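-- pv_equiv track=rewrite | github.com/gustavop-dev/taller_1_algebra_lineal_aplicada_unal | escaleras_y_toboganes/cuarto_punto.py | _destinations
-- ===== SOURCE A (Python) =====
-- from typing import Dict, List, Sequence, Tuple
--
-- def _destinations(length: int, links: Dict[int, int]) -> List[List[int]]:
--     """Return destination squares after rolling 1–6 from each square."""
--     dest = [[] for _ in range(length + 1)]  # dummy zero index
--     for i in range(1, length + 1):
--         row = []
--         for d in range(1, 7):
--             j = i + d
--             row.append(length if j >= length else links.get(j, j))
--         dest[i] = row
--     return dest[1:]
-- ===== SOURCE B (Python) =====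
-- def _destinations(length, links):
--     """Return destination squares after rolling 1-6 from each square.
--
--     Resolves each board square's landing value once into a single array,
--     then reads each row as a slice of that array.
--     """
--     landing = [length if j >= length else links.get(j, j)
--                for j in range(length + 7)]
--     return [landing[i + 1:i + 7] for i in range(1, length + 1)]
-- ===== Notes on version B (the rewrite author's own statement) =====
-- stated objective: simpler
-- what changed: B precomputes one landing array (each square's clamp/lookup resolved exactly once) and reads every row as a slice of it, replacing A's dummy-indexed list filled by a nested per-(square,die) lookup loop.
import Mathlib
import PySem

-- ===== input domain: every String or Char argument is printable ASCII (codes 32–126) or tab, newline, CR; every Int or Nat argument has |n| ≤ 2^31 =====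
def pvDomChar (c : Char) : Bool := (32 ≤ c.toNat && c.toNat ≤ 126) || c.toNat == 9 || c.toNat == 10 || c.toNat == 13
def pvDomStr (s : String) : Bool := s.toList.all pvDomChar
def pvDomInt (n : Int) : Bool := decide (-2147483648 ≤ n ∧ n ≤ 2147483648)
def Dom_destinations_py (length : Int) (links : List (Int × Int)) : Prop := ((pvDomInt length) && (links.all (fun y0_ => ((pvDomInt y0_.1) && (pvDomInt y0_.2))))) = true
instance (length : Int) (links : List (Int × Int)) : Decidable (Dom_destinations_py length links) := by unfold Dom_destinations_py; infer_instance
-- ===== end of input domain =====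

-- B resolves each square's landing value once into a single array and reads every row as a slice of it; objective: simpler.

-- ===== PORT A =====
-- literal transliteration of A: dummy-zero-index list, nested loop filling dest[i], return dest[1:]
def destinations_py (length : Int) (links : List (Int × Int)) : List (List Int) :=
  let dest : List (List Int) :=
    (PySem.List.pyRange 0 (length + 1) 1).map (fun _ => ([] : List Int))
  let dest :=
    (PySem.List.pyRange 1 (length + 1) 1).foldl (fun dest i =>
      let row : List Int :=
        (PySem.List.pyRange 1 7 1).foldl (fun row d =>
          let j := i + d
          row ++ [if j ≥ length then length else (PySem.Dict.mk links).getD j j]) []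
      PySem.List.pySetD dest i row) dest
  PySem.List.slice dest (some 1) none

-- ===== PORT B =====
-- literal transliteration of B: one landing array, rows are slices of it
def destinations_py_alt (length : Int) (links : List (Int × Int)) : List (List Int) :=
  let landing : List Int :=
    (PySem.List.pyRange 0 (length + 7) 1).map (fun j =>
      if j ≥ length then length else (PySem.Dict.mk links).getD j j)
  (PySem.List.pyRange 1 (length + 1) 1).map (fun i =>
    PySem.List.slice landing (some (i + 1)) (some (i + 7)))

-- ===== PRECONDITION & SPEC =====
def Spec_destinations_py (length : Int) (links : List (Int × Int)) (out : List (List Int)) : Prop := out = destinations_py_alt length links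
instance (length : Int) (links : List (Int × Int)) (out : List (List Int)) : Decidable (Spec_destinations_py length links out) := by unfold Spec_destinations_py; infer_instance

-- ===== CLAIM (what is proved, stated in full; the proofs are below) =====
def Claim_equal_destinations_py : Prop := ∀ (length : Int) (links : List (Int × Int)), Dom_destinations_py length links → Spec_destinations_py length links (destinations_py length links)

-- ===== LEMMAS AND PROOFS =====

-- setting index n and taking one more element appends the new value to the old prefix
theorem take_succ_set (xs : List (List Int)) (n : Nat) (v : List Int) (h : n < xs.length) :
    (xs.set n v).take (n+1) = xs.take n ++ [v] := by
  rw [List.take_add_one]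
  simp [List.take_set, h, List.set_eq_of_length_le]

-- A's outer loop: filling dest[i] for i in range(a, L) replaces the suffix by the mapped rows
theorem foldl_pySetD_range (row : Int → List Int) (L : Int) :
    ∀ (n : Nat) (a : Int) (dest : List (List Int)), (L - a).toNat = n → 0 ≤ a → a ≤ L →
    dest.length = L.toNat →
    (PySem.List.pyRange a L 1).foldl (fun d i => PySem.List.pySetD d i (row i)) dest
      = dest.take a.toNat ++ (PySem.List.pyRange a L 1).map row := by
  intro n
  induction n with
  | zero =>
    intro a dest hn ha haL hlen
    have haL' : L ≤ a := by omega
    rw [PySem.List.pyRange_one_eq_nil haL']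
    simp [List.take_of_length_le, hlen, by omega]
  | succ n ih =>
    intro a dest hn ha haL hlen
    have hlt : a < L := by omega
    rw [PySem.List.pyRange_one_cons hlt]
    simp only [List.foldl_cons, List.map_cons]
    rw [PySem.List.pySetD_of_nonneg dest (row a) ha]
    rw [ih (a+1) (dest.set a.toNat (row a)) (by omega) (by omega) (by omega)
        (by simpa using hlen)]
    have h1 : (a+1).toNat = a.toNat + 1 := by omega
    rw [h1, take_succ_set _ _ _ (by omega)]
    simp

-- A's inner die loop is the lookup mapped over the six squares i+1 .. i+6
theorem rowA_eq (length i : Int) (links : List (Int × Int)) :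
    (PySem.List.pyRange 1 7 1).foldl (fun row d =>
        let j := i + d
        row ++ [if j ≥ length then length else (PySem.Dict.mk links).getD j j]) []
      = (PySem.List.pyRange (i+1) (i+7) 1).map (fun j =>
          if j ≥ length then length else (PySem.Dict.mk links).getD j j) := by
  have h1 : PySem.List.pyRange 1 7 1 = [1,2,3,4,5,6] := by decide
  have h2 : PySem.List.pyRange (i+1) (i+7) 1 = [i+1,i+2,i+3,i+4,i+5,i+6] := by
    rw [show i+7 = (i+6)+1 by ring, PySem.List.pyRange_one_succ_right (by omega)]
    rw [show i+6 = (i+5)+1 by ring, PySem.List.pyRange_one_succ_right (by omega)]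
    rw [show i+5 = (i+4)+1 by ring, PySem.List.pyRange_one_succ_right (by omega)]
    rw [show i+4 = (i+3)+1 by ring, PySem.List.pyRange_one_succ_right (by omega)]
    rw [show i+3 = (i+2)+1 by ring, PySem.List.pyRange_one_succ_right (by omega)]
    rw [show i+2 = (i+1)+1 by ring, PySem.List.pyRange_one_singleton]
    simp
  rw [h1, h2]
  simp [List.foldl]

-- B's row: the slice landing[i+1:i+7] is the lookup mapped over the same six squares
theorem rowB_eq (length i : Int) (f : Int → Int) (hi : 1 ≤ i) (hil : i ≤ length) :
    PySem.List.slice ((PySem.List.pyRange 0 (length+7) 1).map f) (some (i+1)) (some (i+7))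
      = (PySem.List.pyRange (i+1) (i+7) 1).map f := by
  rw [PySem.List.slice_toNat _ (by omega) (by omega)]
  rw [PySem.List.pyRange_one_append 0 (i+1) (length+7) (by omega) (by omega),
      PySem.List.pyRange_one_append (i+1) (i+7) (length+7) (by omega) (by omega)]
  rw [List.map_append, List.map_append]
  have hl1 : ((PySem.List.pyRange 0 (i+1) 1).map f).length = (i+1).toNat := by
    simp [PySem.List.length_pyRange_one]
  rw [← hl1, List.drop_left]
  have hl2 : ((PySem.List.pyRange (i+1) (i+7) 1).map f).length = (i+7).toNat - (i+1).toNat := by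
    simp [PySem.List.length_pyRange_one]; omega
  rw [hl1, ← hl2, List.take_left]

-- ===== VERDICT (by name: the statement is the Claim_ definition above) =====
theorem destinations_py_spec : Claim_equal_destinations_py := by
  intro length links _
  unfold Spec_destinations_py destinations_py destinations_py_alt
  dsimp only
  by_cases hL : 0 ≤ length
  · rw [foldl_pySetD_range _ (length + 1) length.toNat 1 _ (by omega) (by omega) (by omega)
        (by simp [PySem.List.length_pyRange_one])]
    rw [PySem.List.pyRange_one_cons (a := 0) (by omega), List.map_cons]
    rw [PySem.List.slice_from_one]
    show List.tail (List.take (1:Int).toNat _ ++ _) = _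
    rw [show ((1:Int).toNat) = 1 from rfl, List.take_succ_cons, List.take_zero,
        List.cons_append, List.nil_append, List.tail_cons]
    apply List.map_congr_left
    intro i hi
    rw [PySem.List.mem_pyRange_one] at hi
    rw [rowA_eq, rowB_eq length i _ (by omega) (by omega)]
  · have h1 : PySem.List.pyRange 1 (length + 1) 1 = [] := PySem.List.pyRange_one_eq_nil (by omega)
    have h0 : PySem.List.pyRange 0 (length + 1) 1 = [] := PySem.List.pyRange_one_eq_nil (by omega)
    rw [h1, h0]
    simp [PySem.List.slice_from_one]
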